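-- pv_equiv track=rewrite | github.com/gptshubham595/BOSCH-Route-Optimization-INTERIIT | crud_ajax/time_window.py | check
-- ===== SOURCE A (Python) =====
-- def check(time_wins, win_len, times):
--
-- 	n=len(time_wins)
-- 	for start in times:
-- 		ends = start + win_len
-- 		cnt = 0
-- 		for interval in time_wins:
-- 			if(interval[0] > ends or interval[1] < start):
-- 				continue
-- 			else:
-- 				cnt += 1
-- 		if(cnt == n):
-- 			return (True, (start, ends))
--
-- 	return (False, (0, 30))
-- ===== SOURCE B (Python) =====
-- def check(time_wins, win_len, times):
--     if not time_wins:
--         if times: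
--             s = times[0]
--             return (True, (s, s + win_len))
--         return (False, (0, 30))
--     lo = max(s for s, _ in time_wins)
--     hi = min(e for _, e in time_wins)
--     for start in times:
--         if lo <= start + win_len and start <= hi:
--             return (True, (start, start + win_len))
--     return (False, (0, 30))
-- ===== Notes on version B (the rewrite author's own statement) =====
-- stated objective: faster
-- what changed: Precompute max of interval starts and min of interval ends once, so each candidate start is checked in O(1) instead of scanning all intervals.
import Mathlib
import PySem

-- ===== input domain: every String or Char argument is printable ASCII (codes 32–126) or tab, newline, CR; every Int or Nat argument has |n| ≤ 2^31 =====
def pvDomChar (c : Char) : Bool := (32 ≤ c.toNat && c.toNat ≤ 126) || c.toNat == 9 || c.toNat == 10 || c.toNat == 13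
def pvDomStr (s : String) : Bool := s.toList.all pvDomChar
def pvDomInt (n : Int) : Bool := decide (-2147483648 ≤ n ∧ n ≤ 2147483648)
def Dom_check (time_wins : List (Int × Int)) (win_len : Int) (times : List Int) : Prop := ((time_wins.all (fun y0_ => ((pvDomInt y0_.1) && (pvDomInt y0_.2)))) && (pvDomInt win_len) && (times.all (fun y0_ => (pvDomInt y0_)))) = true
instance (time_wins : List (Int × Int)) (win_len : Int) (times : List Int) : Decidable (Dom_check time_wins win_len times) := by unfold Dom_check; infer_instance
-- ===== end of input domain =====

-- B precomputes max(interval starts) and min(interval ends) once, giving an O(1) test per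
-- candidate start (faster: O(n+m) instead of A's O(n*m)).


-- ===== PORT A =====
-- A: for each start in times, count intervals overlapping [start, start+win_len];
-- return on the first start whose count equals len(time_wins).
def check (time_wins : List (Int × Int)) (win_len : Int) (times : List Int) : Bool × (Int × Int) :=
  match times with
  | [] => (false, (0, 30))
  | start :: rest =>
      let ends := start + win_len
      let cnt := time_wins.foldl
        (fun c interval => if interval.1 > ends || interval.2 < start then c else c + 1) (0 : Int)
      if cnt = (time_wins.length : Int) then (true, (start, ends))
      else check time_wins win_len rest

-- ===== PORT B =====
-- loop of Source B over the candidate starts, with lo/hi fixed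
def checkAltLoop (lo hi win_len : Int) (times : List Int) : Bool × (Int × Int) :=
  match times with
  | [] => (false, (0, 30))
  | start :: rest =>
      if lo ≤ start + win_len ∧ start ≤ hi then (true, (start, start + win_len))
      else checkAltLoop lo hi win_len rest

def check_alt (time_wins : List (Int × Int)) (win_len : Int) (times : List Int) : Bool × (Int × Int) :=
  match time_wins with
  | [] =>
      match times with
      | [] => (false, (0, 30))
      | s :: _ => (true, (s, s + win_len))
  | p :: rest =>
      -- max(s for s,_ in time_wins) / min(e for _,e in time_wins) as folds
      let lo := rest.foldl (fun m iv => max m iv.1) p.1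
      let hi := rest.foldl (fun m iv => min m iv.2) p.2
      checkAltLoop lo hi win_len times

-- ===== PRECONDITION & SPEC =====
def Spec_check (time_wins : List (Int × Int)) (win_len : Int) (times : List Int) (out : Bool × (Int × Int)) : Prop := out = check_alt time_wins win_len times
instance (time_wins : List (Int × Int)) (win_len : Int) (times : List Int) (out : Bool × (Int × Int)) : Decidable (Spec_check time_wins win_len times out) := by unfold Spec_check; infer_instance

-- ===== CLAIM (what is proved, stated in full; the proofs are below) =====
def Claim_equal_check : Prop := ∀ (time_wins : List (Int × Int)) (win_len : Int) (times : List Int), Dom_check time_wins win_len times → Spec_check time_wins win_len times (check time_wins win_len times)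

-- ===== LEMMAS AND PROOFS =====

-- the counting fold is base + number of overlapping intervals
theorem cnt_foldl_eq (ends start : Int) (l : List (Int × Int)) (c : Int) :
    l.foldl (fun c interval => if interval.1 > ends || interval.2 < start then c else c + 1) c
      = c + ((l.countP (fun iv => !(decide (iv.1 > ends) || decide (iv.2 < start)))) : Int) := by
  induction l generalizing c with
  | nil => simp
  | cons p t ih =>
      simp only [List.foldl_cons, List.countP_cons, ih]
      by_cases h1 : p.1 > ends <;> by_cases h2 : p.2 < start <;> simp [h1, h2] <;> push_cast <;> ring

-- cnt = length ↔ every interval overlaps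
theorem cnt_eq_length_iff (ends start : Int) (l : List (Int × Int)) :
    (l.foldl (fun c interval => if interval.1 > ends || interval.2 < start then c else c + 1) (0 : Int)
      = (l.length : Int))
    ↔ (∀ iv ∈ l, iv.1 ≤ ends ∧ start ≤ iv.2) := by
  rw [cnt_foldl_eq]
  simp only [zero_add]
  constructor
  · intro h iv hm
    have hle : l.countP (fun iv => !(decide (iv.1 > ends) || decide (iv.2 < start))) = l.length := by
      exact_mod_cast h
    have := (List.countP_eq_length).mp hle iv hm
    simp only [Bool.not_eq_eq_eq_not, Bool.not_true, Bool.or_eq_false_iff, decide_eq_false_iff_not] at this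
    omega
  · intro h
    have : l.countP (fun iv => !(decide (iv.1 > ends) || decide (iv.2 < start))) = l.length := by
      apply List.countP_eq_length.mpr
      intro iv hm
      have := h iv hm
      simp only [Bool.not_eq_eq_eq_not, Bool.not_true, Bool.or_eq_false_iff, decide_eq_false_iff_not]
      omega
    exact_mod_cast this

theorem foldl_max_le (l : List (Int × Int)) (b x : Int) :
    l.foldl (fun m iv => max m iv.1) b ≤ x ↔ b ≤ x ∧ ∀ iv ∈ l, iv.1 ≤ x := by
  induction l generalizing b with
  | nil => simp
  | cons p t ih =>
      rw [List.foldl_cons, ih]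
      simp only [max_le_iff, List.mem_cons]
      constructor
      · rintro ⟨⟨h1, h2⟩, h3⟩
        refine ⟨h1, ?_⟩
        rintro iv (rfl | hm)
        · exact h2
        · exact h3 iv hm
      · rintro ⟨h1, h2⟩
        exact ⟨⟨h1, h2 p (Or.inl rfl)⟩, fun iv hm => h2 iv (Or.inr hm)⟩

theorem le_foldl_min (l : List (Int × Int)) (b x : Int) :
    x ≤ l.foldl (fun m iv => min m iv.2) b ↔ x ≤ b ∧ ∀ iv ∈ l, x ≤ iv.2 := by
  induction l generalizing b with
  | nil => simp
  | cons p t ih =>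
      rw [List.foldl_cons, ih]
      simp only [le_min_iff, List.mem_cons]
      constructor
      · rintro ⟨⟨h1, h2⟩, h3⟩
        refine ⟨h1, ?_⟩
        rintro iv (rfl | hm)
        · exact h2
        · exact h3 iv hm
      · rintro ⟨h1, h2⟩
        exact ⟨⟨h1, h2 p (Or.inl rfl)⟩, fun iv hm => h2 iv (Or.inr hm)⟩

-- the nonempty-time_wins case: A's loop equals B's loop
theorem check_eq_altLoop (p : Int × Int) (rest : List (Int × Int)) (win_len : Int) (times : List Int) :
    check (p :: rest) win_len times
      = checkAltLoop (rest.foldl (fun m iv => max m iv.1) p.1)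
                     (rest.foldl (fun m iv => min m iv.2) p.2) win_len times := by
  induction times with
  | nil => rfl
  | cons start ts ih =>
      rw [check, checkAltLoop]
      have hiff :
          ((p :: rest).foldl
              (fun c interval => if interval.1 > start + win_len || interval.2 < start then c else c + 1) (0 : Int)
            = ((p :: rest).length : Int))
          ↔ (rest.foldl (fun m iv => max m iv.1) p.1 ≤ start + win_len
              ∧ start ≤ rest.foldl (fun m iv => min m iv.2) p.2) := by
        rw [cnt_eq_length_iff, foldl_max_le, le_foldl_min]
        constructor
        · intro h
          refine ⟨⟨(h p (List.mem_cons_self)).1, fun iv hm => (h iv (List.mem_cons_of_mem _ hm)).1⟩,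
                  ⟨(h p (List.mem_cons_self)).2, fun iv hm => (h iv (List.mem_cons_of_mem _ hm)).2⟩⟩
        · rintro ⟨⟨h1, h2⟩, ⟨h3, h4⟩⟩ iv hm
          rcases List.mem_cons.mp hm with rfl | hm
          · exact ⟨h1, h3⟩
          · exact ⟨h2 iv hm, h4 iv hm⟩
      by_cases hc : (p :: rest).foldl
          (fun c interval => if interval.1 > start + win_len || interval.2 < start then c else c + 1) (0 : Int)
          = ((p :: rest).length : Int)
      · rw [if_pos hc, if_pos (hiff.mp hc)]
      · rw [if_neg hc, if_neg (fun h => hc (hiff.mpr h)), ih]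

-- the empty-time_wins case: A accepts the first candidate
theorem check_nil_tw (win_len : Int) (times : List Int) :
    check [] win_len times = check_alt [] win_len times := by
  cases times with
  | nil => rfl
  | cons s ts => simp [check, check_alt]

-- ===== VERDICT (by name: the statement is the Claim_ definition above) =====
theorem check_spec : Claim_equal_check := by
  intro time_wins win_len times _
  unfold Spec_check
  cases time_wins with
  | nil => exact check_nil_tw win_len times
  | cons p rest => rw [check_eq_altLoop]; rfl
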